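-- pv_equiv track=rewrite | github.com/binarybottle/optimize_layouts | find_phase2_candidates.py | remove_positions_and_letters
-- ===== SOURCE A (Python) =====
-- def remove_positions_and_letters(layout_dict, positions_to_remove=["W", "A", ";", "O"]):
--     """
--     Remove specified positions and their corresponding letters from a layout.
--
--     Args:
--         layout_dict: Dictionary mapping letters to positions
--         positions_to_remove: List of positions to remove (default: W, A, ;, O)
--
--     Returns:
--         Tuple of (modified layout dict, removed letters)
--     """
--     # Find letters that correspond to the positions to remove
--     letters_to_remove = []
--     for letter, position in layout_dict.items():
--         if position in positions_to_remove:
--             letters_to_remove.append(letter)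
--
--     # Create a new dictionary without the removed positions/letters
--     new_layout = {k: v for k, v in layout_dict.items()
--                  if v not in positions_to_remove and k not in letters_to_remove}
--
--     return new_layout, letters_to_remove
-- ===== SOURCE B (Python) =====
-- def remove_positions_and_letters(layout_dict, positions_to_remove=["W", "A", ";", "O"]):
--     """Single-pass partition of the layout into kept entries and removed letters."""
--     new_layout = {}
--     removed = []
--     for letter, position in layout_dict.items():
--         if position in positions_to_remove:
--             removed.append(letter)
--         else:
--             new_layout[letter] = position
--     return new_layout, removed
-- ===== Notes on version B (the rewrite author's own statement) =====
-- stated objective: simpler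
-- what changed: Replaces A's two scans (build letters_to_remove, then a dict comprehension re-testing both value and key membership) with one partitioning pass that fills new_layout and removed simultaneously, dropping the redundant letter-membership check.
import Mathlib
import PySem

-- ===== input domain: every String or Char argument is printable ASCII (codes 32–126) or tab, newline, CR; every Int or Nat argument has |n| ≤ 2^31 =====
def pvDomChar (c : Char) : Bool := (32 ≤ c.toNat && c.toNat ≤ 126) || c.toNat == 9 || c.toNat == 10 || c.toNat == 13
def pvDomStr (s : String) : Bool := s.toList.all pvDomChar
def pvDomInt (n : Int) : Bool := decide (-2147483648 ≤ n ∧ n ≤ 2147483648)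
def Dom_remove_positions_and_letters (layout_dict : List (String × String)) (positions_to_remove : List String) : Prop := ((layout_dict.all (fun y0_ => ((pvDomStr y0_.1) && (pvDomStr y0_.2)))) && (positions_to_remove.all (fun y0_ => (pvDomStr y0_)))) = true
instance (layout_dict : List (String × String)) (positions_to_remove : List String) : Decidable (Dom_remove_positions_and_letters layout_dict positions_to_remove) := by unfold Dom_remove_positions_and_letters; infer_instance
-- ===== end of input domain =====

-- ===== PORT A =====
-- B merges A's two scans into one partitioning pass over the items; objective: simpler.
def remove_positions_and_letters (layout_dict : List (String × String)) (positions_to_remove : List String) : (List (String × String)) × List String :=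
  let letters_to_remove :=
    layout_dict.foldl (fun acc kv => if positions_to_remove.contains kv.2 then acc ++ [kv.1] else acc) []
  let new_layout :=
    layout_dict.filter (fun kv => !positions_to_remove.contains kv.2 && !letters_to_remove.contains kv.1)
  (new_layout, letters_to_remove)

-- ===== PORT B =====
def remove_positions_and_letters_alt (layout_dict : List (String × String)) (positions_to_remove : List String) : (List (String × String)) × List String :=
  layout_dict.foldl
    (fun st kv =>
      if positions_to_remove.contains kv.2 then (st.1, st.2 ++ [kv.1])
      else (st.1 ++ [kv], st.2))
    ([], [])

-- ===== PRECONDITION & SPEC =====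
-- Pre_ excludes association lists with duplicate keys: they do not represent a Python dict
-- (layout_dict.items() never yields a repeated key), so nothing is claimed there.
def Pre_remove_positions_and_letters (layout_dict : List (String × String)) (positions_to_remove : List String) : Prop :=
  (layout_dict.map Prod.fst).Nodup
instance (layout_dict : List (String × String)) (positions_to_remove : List String) : Decidable (Pre_remove_positions_and_letters layout_dict positions_to_remove) := by unfold Pre_remove_positions_and_letters; infer_instance
def pvWitness_remove_positions_and_letters : (List (String × String)) × List String :=
  ([("a", "W"), ("b", "X"), ("c", ";")], ["W", "A", ";", "O"])
def Spec_remove_positions_and_letters (layout_dict : List (String × String)) (positions_to_remove : List String) (out : (List (String × String)) × List String) : Prop := out = remove_positions_and_letters_alt layout_dict positions_to_remove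
instance (layout_dict : List (String × String)) (positions_to_remove : List String) (out : (List (String × String)) × List String) : Decidable (Spec_remove_positions_and_letters layout_dict positions_to_remove out) := by unfold Spec_remove_positions_and_letters; infer_instance

-- ===== CLAIM (what is proved, stated in full; the proofs are below) =====
def Claim_equal_remove_positions_and_letters : Prop := ∀ (layout_dict : List (String × String)) (positions_to_remove : List String), Dom_remove_positions_and_letters layout_dict positions_to_remove → Pre_remove_positions_and_letters layout_dict positions_to_remove → Spec_remove_positions_and_letters layout_dict positions_to_remove (remove_positions_and_letters layout_dict positions_to_remove)

-- ===== LEMMAS AND PROOFS =====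

-- letters_to_remove fold: accumulator pulls out
theorem lettersF_acc (ptr : List String) (l : List (String × String)) (acc : List String) :
    l.foldl (fun acc kv => if ptr.contains kv.2 then acc ++ [kv.1] else acc) acc
      = acc ++ l.foldl (fun acc kv => if ptr.contains kv.2 then acc ++ [kv.1] else acc) [] := by
  induction l generalizing acc with
  | nil => simp
  | cons h t ih =>
    simp only [List.foldl_cons]
    by_cases hp : ptr.contains h.2
    · rw [if_pos hp, if_pos hp, ih (acc ++ [h.1]), ih ([] ++ [h.1])]; simp
    · rw [if_neg hp, if_neg hp, ih acc]

-- the letters fold is the keys of the value-filtered list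
theorem lettersF_eq (ptr : List String) (l : List (String × String)) :
    l.foldl (fun acc kv => if ptr.contains kv.2 then acc ++ [kv.1] else acc) []
      = (l.filter (fun kv => ptr.contains kv.2)).map Prod.fst := by
  induction l with
  | nil => rfl
  | cons h t ih =>
    simp only [List.foldl_cons, List.filter_cons]
    by_cases hp : ptr.contains h.2
    · have hp' : h.2 ∈ ptr := by simpa using hp
      rw [if_pos hp, lettersF_acc, ih]; simp [hp']
    · have hp' : h.2 ∉ ptr := by simpa using hp
      rw [if_neg hp, ih]; simp [hp']

-- B's fold: accumulator pulls out
theorem altF_acc (ptr : List String) (l : List (String × String))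
    (nl : List (String × String)) (rm : List String) :
    l.foldl (fun st kv => if ptr.contains kv.2 then (st.1, st.2 ++ [kv.1]) else (st.1 ++ [kv], st.2)) (nl, rm)
      = (nl ++ (l.foldl (fun st kv => if ptr.contains kv.2 then (st.1, st.2 ++ [kv.1]) else (st.1 ++ [kv], st.2)) ([], [])).1,
         rm ++ (l.foldl (fun st kv => if ptr.contains kv.2 then (st.1, st.2 ++ [kv.1]) else (st.1 ++ [kv], st.2)) ([], [])).2) := by
  induction l generalizing nl rm with
  | nil => simp
  | cons h t ih =>
    simp only [List.foldl_cons]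
    by_cases hp : ptr.contains h.2
    · rw [if_pos hp, if_pos hp]
      rw [ih nl (rm ++ [h.1]), ih [] ([] ++ [h.1])]
      simp
    · rw [if_neg hp, if_neg hp]
      rw [ih (nl ++ [h]) rm, ih ([] ++ [h]) []]
      simp

-- main equivalence by induction under nodup keys
theorem main_eq (ptr : List String) (l : List (String × String))
    (hnd : (l.map Prod.fst).Nodup) :
    remove_positions_and_letters l ptr = remove_positions_and_letters_alt l ptr := by
  induction l with
  | nil => rfl
  | cons h t ih =>
    simp only [List.map_cons, List.nodup_cons] at hnd
    have hk : h.1 ∉ t.map Prod.fst := hnd.1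
    have ih' := ih hnd.2
    unfold remove_positions_and_letters remove_positions_and_letters_alt at *
    simp only [List.foldl_cons, List.filter_cons]
    -- under nodup keys, the letter-membership test in A's filter is redundant
    have hfiltgen : ∀ (extra : List String), (∀ x ∈ extra, x ∉ t.map Prod.fst) →
        t.filter (fun kv => !ptr.contains kv.2 && !((extra ++ t.foldl (fun acc kv => if ptr.contains kv.2 then acc ++ [kv.1] else acc) []).contains kv.1))
          = t.filter (fun kv => !ptr.contains kv.2 && !((t.foldl (fun acc kv => if ptr.contains kv.2 then acc ++ [kv.1] else acc) []).contains kv.1)) := by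
      intro extra hex
      apply List.filter_congr
      intro kv hkv
      have : kv.1 ∉ extra := fun hm => hex _ hm (List.mem_map_of_mem hkv)
      simp only [List.contains_append]
      simp [this]
    by_cases hp : ptr.contains h.2
    · simp only [hp, if_true, Bool.not_true, Bool.false_and, Bool.false_eq_true, if_false,
        List.nil_append]
      rw [lettersF_acc, altF_acc]
      rw [hfiltgen [h.1] (by intro x hx; rw [List.mem_singleton] at hx; subst hx; exact hk)]
      rw [Prod.ext_iff] at ih' ⊢
      exact ⟨by simpa using ih'.1, by simpa using ih'.2⟩
    · have hpf : ptr.contains h.2 = false := by simpa using hp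
      simp only [hpf, Bool.false_eq_true, if_false, Bool.not_false, Bool.true_and,
        List.nil_append]
      rw [altF_acc]
      have hnot : h.1 ∉ t.foldl (fun acc kv => if ptr.contains kv.2 then acc ++ [kv.1] else acc) [] := by
        rw [lettersF_eq]
        intro hm
        rcases List.mem_map.1 hm with ⟨kv, hkv, he⟩
        exact hk (he ▸ List.mem_map_of_mem (List.mem_of_mem_filter hkv))
      rw [if_pos (by simpa using hnot)]
      rw [Prod.ext_iff] at ih' ⊢
      exact ⟨by simpa using ih'.1, by simpa using ih'.2⟩

-- ===== VERDICT (by name: the statement is the Claim_ definition above) =====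
theorem remove_positions_and_letters_spec : Claim_equal_remove_positions_and_letters := by
  intro l ptr _ hpre
  unfold Spec_remove_positions_and_letters
  exact main_eq ptr l hpre
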